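-- pv_equiv track=rewrite | github.com/ArthurFish6/sae105-donnees | rouzeaua-main/tools/tools_fait_maison.py | decoupe_deuxieme_partie
-- ===== SOURCE A (Python) =====
-- def decoupe_deuxieme_partie(liste, sep):
--     """
--          +----------------------------------------------------------------------+
--          |                                                                      |
--          |                          DECOUPE_DEUXIEME_PARTIE                     |
--          |                                                                      |
--          +----------------------------------------------------------------------+
--          |                                                                      |
--          |   [?] Retourne tout le contenu avant le prémier délimiteur           |
--          |                                                                      |
--          |   [*] LISTE LISSTE                               [*] TEXTE: STR      |
--          |                                                                      |
--          +----------------------------------------------------------------------+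
--     """#doc
--
--     #code
--     liste2 = []
--     on = 0
--
--     for element in liste:
--
--         if on == 1:
--             liste2.append(element)
--
--         if element == sep:
--             on = 1
--
--     liste2 = "".join(liste2)
--
--     return liste2
-- ===== SOURCE B (Python) =====
-- def decoupe_deuxieme_partie(liste, sep):
--     if sep in liste:
--         i = liste.index(sep)
--         return "".join(liste[i + 1:])
--     return ""
-- ===== Notes on version B (the rewrite author's own statement) =====
-- stated objective: simpler
-- what changed: Replaces the boolean-flag streaming loop with a direct index of the first separator and a slice of the tail, joined once.
import Mathlib
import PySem

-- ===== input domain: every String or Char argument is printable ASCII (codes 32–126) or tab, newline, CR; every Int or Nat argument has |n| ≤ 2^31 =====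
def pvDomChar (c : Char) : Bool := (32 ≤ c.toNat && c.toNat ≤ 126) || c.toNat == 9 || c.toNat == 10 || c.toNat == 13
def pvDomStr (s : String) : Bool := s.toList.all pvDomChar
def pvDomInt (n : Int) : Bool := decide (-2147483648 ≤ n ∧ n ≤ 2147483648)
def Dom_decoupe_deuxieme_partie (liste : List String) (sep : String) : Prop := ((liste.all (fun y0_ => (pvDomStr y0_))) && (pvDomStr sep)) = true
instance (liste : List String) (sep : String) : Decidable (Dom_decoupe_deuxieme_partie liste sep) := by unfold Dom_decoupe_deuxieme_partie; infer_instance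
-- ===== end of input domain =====

-- B replaces A's boolean-flag streaming loop by finding the first separator's index and joining the tail slice (objective: simpler).

-- ===== PORT A =====
-- one iteration of A's for-loop: append when the flag is on, then set the flag on the separator
def pvStepA (sep : String) (acc : List String × Int) (element : String) : List String × Int :=
  (if acc.2 == 1 then acc.1 ++ [element] else acc.1, if element == sep then 1 else acc.2)

def decoupe_deuxieme_partie (liste : List String) (sep : String) : String :=
  PySem.Str.join "" (liste.foldl (pvStepA sep) ([], 0)).1

-- ===== PORT B =====
def decoupe_deuxieme_partie_alt (liste : List String) (sep : String) : String :=
  if sep ∈ liste then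
    match PySem.List.index? liste sep with
    | some i => PySem.Str.join "" (PySem.List.slice liste (some ((i : Int) + 1)) none)
    | none => ""
  else ""

-- ===== PRECONDITION & SPEC =====
def Spec_decoupe_deuxieme_partie (liste : List String) (sep : String) (out : String) : Prop := out = decoupe_deuxieme_partie_alt liste sep
instance (liste : List String) (sep : String) (out : String) : Decidable (Spec_decoupe_deuxieme_partie liste sep out) := by unfold Spec_decoupe_deuxieme_partie; infer_instance

-- ===== CLAIM (what is proved, stated in full; the proofs are below) =====
def Claim_equal_decoupe_deuxieme_partie : Prop := ∀ (liste : List String) (sep : String), Dom_decoupe_deuxieme_partie liste sep → Spec_decoupe_deuxieme_partie liste sep (decoupe_deuxieme_partie liste sep)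

-- ===== LEMMAS AND PROOFS =====

-- once the flag is on, every remaining element is appended and the flag stays on
theorem stepA_on1 (sep : String) (l : List String) (acc : List String) :
    l.foldl (pvStepA sep) (acc, 1) = (acc ++ l, 1) := by
  induction l generalizing acc with
  | nil => simp
  | cons x xs ih => simp [pvStepA, ih]

theorem decoupe_eq (liste : List String) (sep : String) :
    decoupe_deuxieme_partie liste sep = decoupe_deuxieme_partie_alt liste sep := by
  induction liste with
  | nil => simp [decoupe_deuxieme_partie, decoupe_deuxieme_partie_alt]; decide
  | cons x xs ih =>
    by_cases h : x = sep
    · subst h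
      have hA : decoupe_deuxieme_partie (x :: xs) x = PySem.Str.join "" xs := by
        simp [decoupe_deuxieme_partie, pvStepA, stepA_on1]
      have hB : decoupe_deuxieme_partie_alt (x :: xs) x = PySem.Str.join "" xs := by
        have h0 : List.idxOf? x (x :: xs) = some 0 := by simpa using PySem.List.index?_cons_self x xs
        simp [decoupe_deuxieme_partie_alt, h0, PySem.List.slice_from_one]
      rw [hA, hB]
    · have hA : decoupe_deuxieme_partie (x :: xs) sep = decoupe_deuxieme_partie xs sep := by
        simp [decoupe_deuxieme_partie, pvStepA, h]
      rw [hA, ih]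
      by_cases hm : sep ∈ xs
      · rcases (PySem.List.index?_isSome_iff xs sep).2 hm |> Option.isSome_iff_exists.1 with ⟨i, hi⟩
        have hcons : PySem.List.index? (x :: xs) sep = some (i + 1) := by
          rw [PySem.List.index?_cons_of_ne _ (fun hh => h hh), hi]; rfl
        simp only [decoupe_deuxieme_partie_alt, hi, hcons,
          List.mem_cons, hm, or_true, if_true, if_pos (Or.inr hm)]
        have h1 : PySem.List.slice xs (some ((i : Int) + 1)) none = xs.drop (i + 1) := by
          rw [show ((i : Int) + 1) = ((i + 1 : Nat) : Int) by push_cast; ring,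
            PySem.List.slice_from_natCast]
        have h2 : PySem.List.slice (x :: xs) (some (((i + 1 : Nat) : Int) + 1)) none
            = (x :: xs).drop (i + 2) := by
          rw [show (((i + 1 : Nat) : Int) + 1) = ((i + 2 : Nat) : Int) by push_cast; ring,
            PySem.List.slice_from_natCast]
        rw [h1, h2]
        simp
      · have hmc : sep ∉ x :: xs := by
          simp only [List.mem_cons, not_or]
          exact ⟨fun hh => h hh.symm, hm⟩
        
        simp [decoupe_deuxieme_partie_alt, hm, hmc]

-- ===== VERDICT (by name: the statement is the Claim_ definition above) =====
theorem decoupe_deuxieme_partie_spec : Claim_equal_decoupe_deuxieme_partie := by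
  intro liste sep _
  exact decoupe_eq liste sep
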